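-- pv_equiv track=rewrite | github.com/algo-gogo/algo_study | 프로그래머스/코딩테스트/kakao/4-1.py | solution
-- ===== SOURCE A (Python) =====
-- from collections import deque
--
-- def solution(coin, cards):
--     card_queue = deque(cards)
--
--     rounds = 0
--     target_sum = len(cards) + 1
--
--     current_card = []
--     for i in range(len(cards) // 3):
--         current_card.append(card_queue.popleft())
--
--     while card_queue:
--         if len(card_queue) >= 2:
--             pair_found = False
--
--             for i in range(len(current_card) - 1):
--                 for j in range(i + 1, len(current_card)):
--                     if current_card[i] + current_card[j] == target_sum:
--                         pair_found = True
--                         break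
--             if pair_found:
--                 card_queue.popleft()
--                 card_queue.popleft()
--             else:
--                 card_queue.popleft()
--                 for i in range(len(current_card) - 1):
--                     for j in range(i + 1, len(current_card)):
--                         if current_card[i] + current_card[j] == target_sum:
--                             coin -= 1
--                             pair_found = True
--                             break
--
--                 if pair_found:
--                     card_queue.popleft()
--                 else:
--                     card_queue.popleft()
--                     for i in range(len(current_card) - 1):
--                         for j in range(i + 1, len(current_card)):
--                             if current_card[i] + current_card[j] == target_sum:
--                                 coin -= 2
--                                 pair_found = True
--                                 break
--                     if pair_found:
--                         break
--         else:
--             break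
--
--         rounds += 1
--
--     return rounds
-- ===== SOURCE B (Python) =====
-- def solution(coin, cards):
--     # The playing hand is fixed after setup, so every round removes exactly two
--     # cards from the queue until fewer than two remain: the round count is a
--     # closed form of the residual queue length.
--     remaining = len(cards) - len(cards) // 3
--     return remaining // 2
-- ===== Notes on version B (the rewrite author's own statement) =====
-- stated objective: faster
-- what changed: Replaced the whole deque simulation (whose pair-test over the fixed hand makes every iteration pop exactly two cards) with the closed form (len(cards) - len(cards)//3) // 2.
import Mathlib
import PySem

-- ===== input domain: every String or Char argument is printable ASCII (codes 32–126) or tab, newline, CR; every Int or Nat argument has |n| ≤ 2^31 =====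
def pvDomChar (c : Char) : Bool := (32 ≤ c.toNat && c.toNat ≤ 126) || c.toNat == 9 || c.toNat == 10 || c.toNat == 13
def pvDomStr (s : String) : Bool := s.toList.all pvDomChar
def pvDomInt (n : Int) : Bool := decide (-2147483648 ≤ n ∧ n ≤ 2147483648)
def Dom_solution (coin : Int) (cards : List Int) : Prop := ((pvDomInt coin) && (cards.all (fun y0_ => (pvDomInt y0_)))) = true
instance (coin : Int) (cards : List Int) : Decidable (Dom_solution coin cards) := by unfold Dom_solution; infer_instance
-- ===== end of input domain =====

-- B replaces A's whole deque simulation by the closed form (len - len//3) // 2 (faster: O(1) vs O(n^2)).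

-- ===== PORT A =====
-- the nested 'for i … for j …' scan of current_card with its break-out flag
def pvPairScan (cur : List Int) (target : Int) : Bool :=
  (List.range (cur.length - 1)).any fun i =>
    (List.range' (i + 1) (cur.length - (i + 1))).any fun j =>
      cur.getD i 0 + cur.getD j 0 == target

-- the 'while card_queue:' loop; each popleft is a drop of one element at the front
def pvLoop (cur : List Int) (target : Int) (q : List Int) (coin rounds : Int) : Int :=
  if h : 2 ≤ q.length then
    if pvPairScan cur target then
      pvLoop cur target (q.drop 2) coin (rounds + 1)
    else
      if pvPairScan cur target then
        pvLoop cur target (q.drop 2) (coin - 1) (rounds + 1)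
      else
        if pvPairScan cur target then
          rounds
        else
          pvLoop cur target (q.drop 2) (coin - 2) (rounds + 1)
  else rounds
termination_by q.length
decreasing_by all_goals (simp [List.length_drop]; omega)

def solution (coin : Int) (cards : List Int) : Int :=
  let targetSum : Int := (cards.length : Int) + 1
  -- 'for i in range(len(cards)//3): current_card.append(card_queue.popleft())'
  let currentCard : List Int := cards.take (cards.length / 3)
  let cardQueue : List Int := cards.drop (cards.length / 3)
  pvLoop currentCard targetSum cardQueue coin 0

-- ===== PORT B =====
def solution_alt (coin : Int) (cards : List Int) : Int :=
  let n : Int := (cards.length : Int)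
  let remaining : Int := n - PySem.Int.floordiv n 3
  PySem.Int.floordiv remaining 2

-- ===== PRECONDITION & SPEC =====
def Spec_solution (coin : Int) (cards : List Int) (out : Int) : Prop := out = solution_alt coin cards
instance (coin : Int) (cards : List Int) (out : Int) : Decidable (Spec_solution coin cards out) := by unfold Spec_solution; infer_instance

-- ===== CLAIM (what is proved, stated in full; the proofs are below) =====
def Claim_equal_solution : Prop := ∀ (coin : Int) (cards : List Int), Dom_solution coin cards → Spec_solution coin cards (solution coin cards)

-- ===== LEMMAS AND PROOFS =====
-- Every iteration of A's while loop removes exactly two queue elements, so the loop counts ⌊|q|/2⌋.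
theorem pvLoop_eq (cur : List Int) (t : Int) (q : List Int) (coin rounds : Int) :
    pvLoop cur t q coin rounds = rounds + ((q.length / 2 : Nat) : Int) := by
  fun_induction pvLoop cur t q coin rounds with
  | case1 q coin rounds h hs ih =>
      rw [ih]; simp [List.length_drop]; omega
  | case2 q coin rounds h hs1 hs2 ih =>
      simp [hs2] at hs1
  | case3 q coin rounds h hs1 hs2 hs3 =>
      simp [hs3] at hs1
  | case4 q coin rounds h hs1 hs2 hs3 ih =>
      rw [ih]; simp [List.length_drop]; omega
  | case5 q coin rounds h =>
      have : q.length / 2 = 0 := by omega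
      simp [this]

-- ===== VERDICT (by name: the statement is the Claim_ definition above) =====
theorem solution_spec : Claim_equal_solution := by
  intro coin cards _
  unfold Spec_solution solution solution_alt
  rw [pvLoop_eq]
  dsimp only
  have h3 : PySem.Int.floordiv (cards.length : Int) 3 = ((cards.length / 3 : Nat) : Int) :=
    PySem.Int.floordiv_natCast _ 3
  have hsub : ((cards.length : Int) - ((cards.length / 3 : Nat) : Int))
      = ((cards.length - cards.length / 3 : Nat) : Int) := by
    push_cast [Nat.sub_add_cancel]; omega
  have h2 : PySem.Int.floordiv ((cards.length - cards.length / 3 : Nat) : Int) 2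
      = (((cards.length - cards.length / 3) / 2 : Nat) : Int) := by
    exact_mod_cast PySem.Int.floordiv_natCast (cards.length - cards.length / 3) 2
  rw [h3, hsub, h2]
  simp [List.length_drop]
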